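-- pv_equiv track=rewrite | github.com/cheng-tan/mwt-ds | DataScience/FeatureImportance.py | get_feature_buckets
-- ===== SOURCE A (Python) =====
-- def get_feature_buckets(features_funnel):
--     union_features = []
--     feature_buckets = []
--     for features in reversed(features_funnel):
--         unique_features = list(set(features) - set(union_features))
--         if len(unique_features) > 0:
--             unique_features.sort()
--             feature_buckets.append(unique_features)
--             union_features.extend(unique_features)
--     return feature_buckets
-- ===== SOURCE B (Python) =====
-- def get_feature_buckets(features_funnel):
--     # One forward pass records each feature's last funnel level; buckets are then
--     # read off per level in descending order, sorted. O(N + k log k) vs A's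
--     # per-level set rebuild of the whole running union.
--     last_level = {}
--     for i, features in enumerate(features_funnel):
--         for f in features:
--             last_level[f] = i
--     by_level = {}
--     for f, i in last_level.items():
--         by_level.setdefault(i, []).append(f)
--     feature_buckets = []
--     for i in range(len(features_funnel) - 1, -1, -1):
--         if i in by_level:
--             feature_buckets.append(sorted(by_level[i]))
--     return feature_buckets
-- ===== Notes on version B (the rewrite author's own statement) =====
-- stated objective: faster
-- what changed: Instead of A's reversed loop that rebuilds set(union_features) from an ever-growing list at every level, B makes one forward pass recording each feature's last funnel level in a dict, groups features by that level, and emits the sorted groups in descending level order.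
import Mathlib
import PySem

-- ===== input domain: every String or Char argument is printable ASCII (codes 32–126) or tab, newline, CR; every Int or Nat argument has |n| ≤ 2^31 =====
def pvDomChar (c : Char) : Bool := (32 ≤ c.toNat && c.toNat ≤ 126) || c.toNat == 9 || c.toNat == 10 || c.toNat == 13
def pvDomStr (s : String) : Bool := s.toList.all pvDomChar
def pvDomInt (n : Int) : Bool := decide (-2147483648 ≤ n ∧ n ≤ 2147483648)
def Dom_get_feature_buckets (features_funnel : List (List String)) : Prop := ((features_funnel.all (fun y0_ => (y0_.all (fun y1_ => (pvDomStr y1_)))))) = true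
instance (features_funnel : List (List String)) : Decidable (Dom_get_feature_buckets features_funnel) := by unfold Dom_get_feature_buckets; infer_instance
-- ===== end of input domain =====

-- B replaces A's per-level rebuild of the running union set by a last-occurrence-level
-- dict built in one forward pass (faster in a timing run's measurement).

-- ===== PORT A =====
def get_feature_buckets (features_funnel : List (List String)) : List (List String) :=
  let r := features_funnel.reverse.foldl
    (fun (st : List String × List (List String)) features =>
      let unique_features := PySem.Set.diff (PySem.Set.ofList features) (PySem.Set.ofList st.1)
      if unique_features.length > 0 then
        let uf := PySem.List.sorted unique_features (fun x => x) false
        (st.1 ++ uf, st.2 ++ [uf])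
      else st)
    ([], [])
  r.2

-- ===== PORT B =====
def get_feature_buckets_alt (features_funnel : List (List String)) : List (List String) :=
  let last_level : PySem.Dict String Int :=
    (PySem.List.enumerate features_funnel 0).foldl
      (fun d p => p.2.foldl (fun d f => d.insert f p.1) d) PySem.Dict.empty
  let by_level : PySem.Dict Int (List String) :=
    last_level.items.foldl (fun g p => g.modify p.2 [] (· ++ [p.1])) PySem.Dict.empty
  -- by_level[i] is only read under the `i in by_level` guard, so getD is exact
  (PySem.List.pyRange ((PySem.List.len features_funnel) - 1) (-1) (-1)).foldl
    (fun acc i =>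
      if by_level.contains i then
        acc ++ [PySem.List.sorted (by_level.getD i []) (fun x => x) false]
      else acc) []

-- ===== PRECONDITION & SPEC =====
def Spec_get_feature_buckets (features_funnel : List (List String)) (out : List (List String)) : Prop := out = get_feature_buckets_alt features_funnel
instance (features_funnel : List (List String)) (out : List (List String)) : Decidable (Spec_get_feature_buckets features_funnel out) := by unfold Spec_get_feature_buckets; infer_instance

-- ===== CLAIM (what is proved, stated in full; the proofs are below) =====
def Claim_equal_get_feature_buckets : Prop := ∀ (features_funnel : List (List String)), Dom_get_feature_buckets features_funnel → Spec_get_feature_buckets features_funnel (get_feature_buckets features_funnel)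

-- ===== LEMMAS AND PROOFS =====


-- sorted lists of two member-equal duplicate-free lists coincide
theorem pv_sorted_congr (l1 l2 : List String) (h1 : l1.Nodup) (h2 : l2.Nodup)
    (h : ∀ x, x ∈ l1 ↔ x ∈ l2) :
    PySem.List.sorted l1 (fun x => x) false = PySem.List.sorted l2 (fun x => x) false := by
  have hperm : (PySem.List.sorted l2 (fun x => x) false).Perm l1 := by
    refine (PySem.List.sorted_perm l2 (fun x => x) false).trans ?_
    exact (List.perm_ext_iff_of_nodup h2 h1).mpr (fun x => (h x).symm)
  have hle : (PySem.List.sorted l2 (fun x => x) false).Pairwise (fun a b => a ≤ b) :=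
    PySem.List.sorted_pairwise l2 (fun x => x)
  have hnd : (PySem.List.sorted l2 (fun x => x) false).Nodup :=
    ((PySem.List.sorted_perm l2 (fun x => x) false).nodup_iff).mpr h2
  have hlt : (PySem.List.sorted l2 (fun x => x) false).Pairwise (fun a b => a < b) :=
    (hle.and hnd).imp (fun hab => lt_of_le_of_ne hab.1 hab.2)
  exact PySem.List.sorted_eq_of_perm_of_pairwise_lt l1 _ (fun x => x) hperm hlt

-- the bucket one funnel level contributes, given the running union u (as a list, read via membership)
def pvBkt (l u : List String) : List (List String) :=
  let s := PySem.List.sorted (PySem.Set.diff (PySem.Set.ofList l) (PySem.Set.ofList u)) (fun x => x) false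
  if s.length > 0 then [s] else []

theorem pv_diff_sorted_congr (l u₁ u₂ : List String) (h : ∀ x, x ∈ u₁ ↔ x ∈ u₂) :
    PySem.List.sorted (PySem.Set.diff (PySem.Set.ofList l) (PySem.Set.ofList u₁)) (fun x => x) false
      = PySem.List.sorted (PySem.Set.diff (PySem.Set.ofList l) (PySem.Set.ofList u₂)) (fun x => x) false := by
  refine pv_sorted_congr _ _ (PySem.Set.nodup_diff _ _ (PySem.Set.nodup_ofList l)) (PySem.Set.nodup_diff _ _ (PySem.Set.nodup_ofList l)) ?_
  intro x
  simp [PySem.Set.mem_diff, PySem.Set.mem_ofList, h x]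

theorem pvBkt_congr (l u₁ u₂ : List String) (h : ∀ x, x ∈ u₁ ↔ x ∈ u₂) : pvBkt l u₁ = pvBkt l u₂ := by
  unfold pvBkt
  rw [pv_diff_sorted_congr l u₁ u₂ h]

-- A's loop, written as structural recursion with the union always extended by the whole level
def pvBuckets : List (List String) → List String → List (List String)
  | [], _ => []
  | l :: ls, u => pvBkt l u ++ pvBuckets ls (u ++ l)

theorem pvBuckets_congr (ls : List (List String)) : ∀ u₁ u₂ : List String, (∀ x, x ∈ u₁ ↔ x ∈ u₂) → pvBuckets ls u₁ = pvBuckets ls u₂ := by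
  induction ls with
  | nil => intro _ _ _; rfl
  | cons l ls ih =>
    intro u₁ u₂ h
    unfold pvBuckets
    rw [pvBkt_congr l u₁ u₂ h, ih (u₁ ++ l) (u₂ ++ l) (by intro x; simp [h x])]

theorem pv_A_foldl (ls : List (List String)) : ∀ (u : List String) (b : List (List String)),
    (ls.foldl
      (fun (st : List String × List (List String)) features =>
        let unique_features := PySem.Set.diff (PySem.Set.ofList features) (PySem.Set.ofList st.1)
        if unique_features.length > 0 then
          let uf := PySem.List.sorted unique_features (fun x => x) false
          (st.1 ++ uf, st.2 ++ [uf])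
        else st)
      (u, b)).2 = b ++ pvBuckets ls u := by
  induction ls with
  | nil => intro u b; simp [pvBuckets]
  | cons l ls ih =>
    intro u b
    rw [List.foldl_cons]
    by_cases hne : (PySem.Set.diff (PySem.Set.ofList l) (PySem.Set.ofList u)).length > 0
    · simp only [hne, if_pos]
      rw [ih]
      have hmem : ∀ x, x ∈ u ++ PySem.List.sorted (PySem.Set.diff (PySem.Set.ofList l) (PySem.Set.ofList u)) (fun x => x) false ↔ x ∈ u ++ l := by
        intro x
        simp [PySem.List.mem_sorted, PySem.Set.mem_diff, PySem.Set.mem_ofList]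
        tauto
      rw [pvBuckets_congr ls _ _ hmem]
      have hb : pvBkt l u = [PySem.List.sorted (PySem.Set.diff (PySem.Set.ofList l) (PySem.Set.ofList u)) (fun x => x) false] := by
        unfold pvBkt
        simp [PySem.List.length_sorted, hne]
      simp [pvBuckets, hb]
    · simp only [hne, if_false]
      rw [ih]
      have hd : PySem.Set.diff (PySem.Set.ofList l) (PySem.Set.ofList u) = [] := by
        cases hdd : PySem.Set.diff (PySem.Set.ofList l) (PySem.Set.ofList u) with
        | nil => rfl
        | cons a t => exfalso; apply hne; rw [hdd]; simp
      have hsub : ∀ x ∈ l, x ∈ u := by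
        intro x hx
        by_contra hxu
        have : x ∈ PySem.Set.diff (PySem.Set.ofList l) (PySem.Set.ofList u) := by
          simp [PySem.Set.mem_diff, PySem.Set.mem_ofList]; exact ⟨hx, hxu⟩
        rw [hd] at this; simp at this
      have hb : pvBkt l u = [] := by unfold pvBkt; simp [PySem.List.length_sorted, hd]
      have hmem : ∀ x, x ∈ u ↔ x ∈ u ++ l := by
        intro x; simp; intro hl; exact hsub x hl
      rw [pvBuckets_congr ls _ _ hmem]
      simp [pvBuckets, hb]

theorem pv_A_eq (ff : List (List String)) : get_feature_buckets ff = pvBuckets ff.reverse [] := by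
  unfold get_feature_buckets
  exact pv_A_foldl ff.reverse [] []


theorem pvBuckets_flatMap (ls : List (List String)) : ∀ u : List String,
    pvBuckets ls u = (List.range ls.length).flatMap (fun k => pvBkt (ls.getD k []) (u ++ (ls.take k).flatten)) := by
  induction ls with
  | nil => intro u; rfl
  | cons l ls ih =>
    intro u
    rw [List.length_cons, List.range_succ_eq_map, List.flatMap_cons, List.flatMap_map]
    simp only [List.getD_cons_zero, List.take_zero, List.flatten_nil, List.append_nil]
    unfold pvBuckets
    rw [ih (u ++ l)]
    have hf : (fun (a : Nat) => pvBkt ((l :: ls).getD a.succ []) (u ++ ((l :: ls).take a.succ).flatten))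
        = fun k => pvBkt (ls.getD k []) (u ++ l ++ (ls.take k).flatten) := by
      funext k; simp [List.append_assoc]
    rw [hf]

-- enumerate from the top: indices counted down
def pvDecEnum (s : Int) : List (List String) → List (Int × List String)
  | [] => []
  | l :: ls => (s, l) :: pvDecEnum (s - 1) ls

theorem pv_enum_rev (ls : List (List String)) : ∀ s : Int,
    (PySem.List.enumerate ls s).reverse = pvDecEnum (s + ls.length - 1) ls.reverse := by
  induction ls using List.reverseRecOn with
  | nil => intro s; simp [PySem.List.enumerate_nil, pvDecEnum]
  | append_singleton ls x ih =>
    intro s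
    rw [PySem.List.enumerate_append, List.reverse_append]
    simp only [PySem.List.enumerate_cons, PySem.List.enumerate_nil, List.reverse_cons,
      List.reverse_nil, List.nil_append, List.cons_append, List.reverse_append,
      List.length_append, List.length_cons, List.length_nil]
    rw [ih s, pvDecEnum]
    congr 2 <;> push_cast <;> ring

theorem pv_innerGet (l : List String) (v : Int) : ∀ (d : PySem.Dict String Int) (x : String),
    (l.foldl (fun d f => d.insert f v) d).get? x = if x ∈ l then some v else d.get? x := by
  induction l with
  | nil => intro d x; simp
  | cons f t ih =>
    intro d x
    rw [List.foldl_cons, ih]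
    rw [PySem.Dict.get?_insert]
    by_cases h1 : x ∈ t <;> by_cases h2 : x = f <;> simp [h1, h2]

theorem pv_outerGet (ps : List (Int × List String)) : ∀ (d : PySem.Dict String Int) (x : String),
    (ps.foldl (fun d p => p.2.foldl (fun d f => d.insert f p.1) d) d).get? x =
      (ps.reverse.find? (fun p => decide (x ∈ p.2))).elim (d.get? x) (fun p => some p.1) := by
  induction ps using List.reverseRecOn with
  | nil => intro d x; simp
  | append_singleton ps q ih =>
    intro d x
    rw [List.foldl_append, List.foldl_cons, List.foldl_nil, pv_innerGet, List.reverse_append]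
    simp only [List.reverse_cons, List.reverse_nil, List.nil_append, List.cons_append,
      List.nil_append]
    by_cases hx : x ∈ q.2
    · rw [List.find?_cons_of_pos (by simpa using hx)]
      simp [hx]
    · rw [List.find?_cons_of_neg (by simpa using hx)]
      simp [hx, ih]

theorem pv_decEnum_find_le (lr : List (List String)) : ∀ (s : Int) (pred : Int × List String → Bool) (p : Int × List String),
    (pvDecEnum s lr).find? pred = some p → p.1 ≤ s := by
  induction lr with
  | nil => intro s pred p h; simp [pvDecEnum] at h
  | cons l ls ih =>
    intro s pred p h
    rw [pvDecEnum] at h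
    by_cases hp : pred (s, l)
    · rw [List.find?_cons_of_pos hp] at h
      cases h; simp
    · rw [List.find?_cons_of_neg hp] at h
      have := ih (s - 1) pred p h
      omega

theorem pv_findD (lr : List (List String)) : ∀ (s : Int) (x : String) (k : Nat), k < lr.length →
    (((pvDecEnum s lr).find? (fun p => decide (x ∈ p.2))).map Prod.fst = some (s - k) ↔
      (x ∈ lr.getD k [] ∧ x ∉ (lr.take k).flatten)) := by
  induction lr with
  | nil => intro s x k hk; simp at hk
  | cons l ls ih =>
    intro s x k hk
    rw [pvDecEnum]
    by_cases hx : x ∈ l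
    · rw [List.find?_cons_of_pos (by simpa using hx)]
      cases k with
      | zero => simp [hx]
      | succ j =>
        simp only [Option.map_some, List.getD_cons_succ, List.take_succ_cons, List.flatten_cons]
        constructor
        · intro h
          exfalso
          have : s = s - ((j : Int) + 1) := by simpa using Option.some.inj h
          omega
        · rintro ⟨-, hnot⟩
          exact absurd (List.mem_append_left _ hx) hnot
    · rw [List.find?_cons_of_neg (by simpa using hx)]
      cases k with
      | zero =>
        simp only [List.getD_cons_zero, List.take_zero, List.flatten_nil, List.not_mem_nil,
          not_false_iff, and_true]
        constructor
        · intro h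
          exfalso
          cases hfind : (pvDecEnum (s - 1) ls).find? (fun p => decide (x ∈ p.2)) with
          | none => rw [hfind] at h; simp at h
          | some p =>
            rw [hfind] at h
            have hle := pv_decEnum_find_le ls (s - 1) _ p hfind
            have : p.1 = s - (0 : Nat) := by simpa using Option.some.inj h
            omega
        · intro h; exact absurd h hx
      | succ j =>
        have hj : j < ls.length := by simpa using hk
        have := ih (s - 1) x j hj
        have harith : s - 1 - (j : Int) = s - ((j : Nat) + 1 : Nat) := by push_cast; ring
        rw [harith] at this
        rw [this]
        simp [hx]

theorem pv_keys_nodup (ps : List (Int × List String)) : ∀ d : PySem.Dict String Int, d.keys.Nodup →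
    (ps.foldl (fun d p => p.2.foldl (fun d f => d.insert f p.1) d) d).keys.Nodup := by
  induction ps with
  | nil => intro d h; simpa
  | cons q ps ih =>
    intro d h
    rw [List.foldl_cons]
    exact ih _ (PySem.Dict.nodup_keys_foldl_insert q.2 (fun _ _ => q.1) d h)


-- last_level and by_level of port B, named for the proofs
def pvLast (ff : List (List String)) : PySem.Dict String Int :=
  (PySem.List.enumerate ff 0).foldl (fun d p => p.2.foldl (fun d f => d.insert f p.1) d) PySem.Dict.empty

def pvBy (ff : List (List String)) : PySem.Dict Int (List String) :=
  (pvLast ff).items.foldl (fun g p => g.modify p.2 [] (· ++ [p.1])) PySem.Dict.empty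

theorem pv_last_get (ff : List (List String)) (x : String) :
    (pvLast ff).get? x
      = ((pvDecEnum ((ff.length : Int) - 1) ff.reverse).find? (fun p => decide (x ∈ p.2))).map Prod.fst := by
  unfold pvLast
  rw [pv_outerGet, pv_enum_rev ff 0]
  have e : (0 : Int) + ff.length - 1 = (ff.length : Int) - 1 := by ring
  rw [e]
  cases (pvDecEnum ((ff.length : Int) - 1) ff.reverse).find? (fun p => decide (x ∈ p.2)) <;>
    simp [PySem.Dict.get?_empty]

theorem pv_last_keys_nodup (ff : List (List String)) : (pvLast ff).keys.Nodup :=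
  pv_keys_nodup _ PySem.Dict.empty PySem.Dict.nodup_keys_empty

theorem pv_last_get_iff (ff : List (List String)) (x : String) (k : Nat) (hk : k < ff.length) :
    ((pvLast ff).get? x = some (((ff.length : Int) - 1) - k) ↔
      (x ∈ ff.reverse.getD k [] ∧ x ∉ (ff.reverse.take k).flatten)) := by
  rw [pv_last_get]
  exact pv_findD ff.reverse _ x k (by simpa)

theorem pv_by_getD (ff : List (List String)) (i : Int) :
    (pvBy ff).getD i [] = ((pvLast ff).items.filter (fun p => p.2 == i)).map Prod.fst := by
  unfold pvBy
  rw [show ((pvLast ff).items.foldl (fun g p => g.modify p.2 [] (· ++ [p.1])) PySem.Dict.empty)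
      = (((pvLast ff).items.map (fun p => (p.2, p.1))).foldl (fun g q => g.modify q.1 [] (· ++ [q.2])) PySem.Dict.empty) from
    (List.foldl_map (f := fun (p : String × Int) => (p.2, p.1))
      (g := fun (g : PySem.Dict Int (List String)) (q : Int × String) => g.modify q.1 [] (· ++ [q.2]))
      (l := (pvLast ff).items) (init := PySem.Dict.empty)).symm]
  rw [PySem.Dict.getD_foldl_modify_append]
  simp [List.filter_map, List.map_map, Function.comp_def]

theorem pv_by_contains (ff : List (List String)) (i : Int) :
    ((pvBy ff).contains i = true ↔ ∃ p ∈ (pvLast ff).items, p.2 = i) := by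
  unfold pvBy
  rw [PySem.Dict.contains_iff_mem_keys,
    PySem.Dict.keys_foldl_modify_key (pvLast ff).items (fun p => p.2) [] (fun g p => (· ++ [p.1])) PySem.Dict.empty]
  simp only [PySem.Dict.keys_empty, PySem.Set.update_nil_left, PySem.Set.mem_ofList, List.mem_map]

theorem pv_per_k (ff : List (List String)) (k : Nat) (hk : k < ff.length) :
    (if (pvBy ff).contains (((ff.length : Int) - 1) - k) then
        [PySem.List.sorted ((pvBy ff).getD (((ff.length : Int) - 1) - k) []) (fun x => x) false]
      else []) = pvBkt (ff.reverse.getD k []) ((ff.reverse.take k).flatten) := by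
  set i : Int := ((ff.length : Int) - 1) - k with hi
  have hmem : ∀ x, x ∈ (pvBy ff).getD i [] ↔
      x ∈ PySem.Set.diff (PySem.Set.ofList (ff.reverse.getD k []))
            (PySem.Set.ofList ((ff.reverse.take k).flatten)) := by
    intro x
    rw [pv_by_getD]
    simp only [List.mem_map, List.mem_filter, PySem.Set.mem_diff, PySem.Set.mem_ofList]
    constructor
    · rintro ⟨p, ⟨hp, hpi⟩, rfl⟩
      have : (pvLast ff).get? p.1 = some i := by
        rw [PySem.Dict.get?_eq_some_iff_mem_items _ _ _ (pv_last_keys_nodup ff)]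
        have : p = (p.1, i) := by
          cases p; simp at hpi ⊢; exact hpi
        rwa [← this]
      exact (pv_last_get_iff ff p.1 k hk).mp this
    · intro hx
      have : (pvLast ff).get? x = some i := (pv_last_get_iff ff x k hk).mpr hx
      rw [PySem.Dict.get?_eq_some_iff_mem_items _ _ _ (pv_last_keys_nodup ff)] at this
      exact ⟨(x, i), ⟨this, by simp⟩, rfl⟩
  have hnodup : ((pvBy ff).getD i []).Nodup := by
    rw [pv_by_getD]
    have hkeys : ((pvLast ff).items.map Prod.fst).Nodup := pv_last_keys_nodup ff
    exact hkeys.sublist (List.Sublist.map Prod.fst List.filter_sublist)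
  have hsorted : PySem.List.sorted ((pvBy ff).getD i []) (fun x => x) false
      = PySem.List.sorted (PySem.Set.diff (PySem.Set.ofList (ff.reverse.getD k []))
            (PySem.Set.ofList ((ff.reverse.take k).flatten))) (fun x => x) false :=
    pv_sorted_congr _ _ hnodup (PySem.Set.nodup_diff _ _ (PySem.Set.nodup_ofList _)) hmem
  have hcont : ((pvBy ff).contains i = true ↔
      PySem.Set.diff (PySem.Set.ofList (ff.reverse.getD k []))
        (PySem.Set.ofList ((ff.reverse.take k).flatten)) ≠ []) := by
    rw [pv_by_contains]
    constructor
    · rintro ⟨p, hp, hpi⟩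
      have : (pvLast ff).get? p.1 = some i := by
        rw [PySem.Dict.get?_eq_some_iff_mem_items _ _ _ (pv_last_keys_nodup ff)]
        have he : p = (p.1, i) := by cases p; simp at hpi ⊢; exact hpi
        rwa [← he]
      have hx := (pv_last_get_iff ff p.1 k hk).mp this
      intro hnil
      have : p.1 ∈ PySem.Set.diff (PySem.Set.ofList (ff.reverse.getD k []))
          (PySem.Set.ofList ((ff.reverse.take k).flatten)) := by
        rw [PySem.Set.mem_diff]
        simp only [PySem.Set.mem_ofList]
        exact hx
      rw [hnil] at this
      simp at this
    · intro hne
      obtain ⟨x, hx⟩ := List.exists_mem_of_ne_nil _ hne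
      rw [PySem.Set.mem_diff] at hx
      simp only [PySem.Set.mem_ofList] at hx
      have : (pvLast ff).get? x = some i := (pv_last_get_iff ff x k hk).mpr hx
      rw [PySem.Dict.get?_eq_some_iff_mem_items _ _ _ (pv_last_keys_nodup ff)] at this
      exact ⟨(x, i), this, rfl⟩
  unfold pvBkt
  by_cases hc : (pvBy ff).contains i
  · rw [if_pos hc, hsorted]
    have hne := hcont.mp hc
    have hlen : 0 < (PySem.List.sorted (PySem.Set.diff (PySem.Set.ofList (ff.reverse.getD k []))
        (PySem.Set.ofList ((ff.reverse.take k).flatten))) (fun x => x) false).length := by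
      rw [PySem.List.length_sorted]
      exact List.length_pos_of_ne_nil hne
    simp only [hlen, if_pos]
  · rw [if_neg hc]
    have hnil : PySem.Set.diff (PySem.Set.ofList (ff.reverse.getD k []))
        (PySem.Set.ofList ((ff.reverse.take k).flatten)) = [] := by
      by_contra hne
      exact hc (hcont.mpr hne)
    have hs : PySem.List.sorted (PySem.Set.diff (PySem.Set.ofList (ff.reverse.getD k []))
        (PySem.Set.ofList ((ff.reverse.take k).flatten))) (fun x => x) false = [] :=
      (PySem.List.sorted_eq_nil_iff _ _ _).mpr hnil
    rw [hs]
    simp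

theorem pv_B_eq (ff : List (List String)) :
    get_feature_buckets_alt ff
      = (List.range ff.length).flatMap (fun k => pvBkt (ff.reverse.getD k []) ((ff.reverse.take k).flatten)) := by
  unfold get_feature_buckets_alt
  show (PySem.List.pyRange ((PySem.List.len ff) - 1) (-1) (-1)).foldl
      (fun acc i =>
        if (pvBy ff).contains i then
          acc ++ [PySem.List.sorted ((pvBy ff).getD i []) (fun x => x) false]
        else acc) [] = _
  rw [PySem.List.len_eq, PySem.List.pyRange_neg_one]
  have e : ((ff.length : Int) - 1 - (-1)).toNat = ff.length := by omega
  rw [e, List.foldl_map]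
  rw [PySem.List.foldl_congr_mem _ _
      (fun acc (k : Nat) => acc ++ (if (pvBy ff).contains (((ff.length : Int) - 1) - k) then
        [PySem.List.sorted ((pvBy ff).getD (((ff.length : Int) - 1) - k) []) (fun x => x) false] else [])) _
      (by intro acc k _; by_cases hc : (pvBy ff).contains (((ff.length : Int) - 1) - k) <;> simp [hc])]
  rw [PySem.List.foldl_append_eq_flatMap]
  rw [List.nil_append, List.flatMap_def, List.flatMap_def]
  congr 1
  apply List.map_congr_left
  intro k hkmem
  exact pv_per_k ff k (List.mem_range.mp hkmem)

-- ===== VERDICT (by name: the statement is the Claim_ definition above) =====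
theorem get_feature_buckets_spec : Claim_equal_get_feature_buckets := by
  intro ff _
  unfold Spec_get_feature_buckets
  rw [pv_A_eq ff, pv_B_eq ff, pvBuckets_flatMap]
  simp [List.length_reverse]
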